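-- pv_equiv track=rewrite | github.com/yonatan-h/competitive-programming | week9-after-admission/Maximum Number Of Coins You Can Get.py | get_max_coins
-- ===== SOURCE A (Python) =====
-- from collections import deque
--
-- def get_max_coins(piles):
--     piles.sort()
--     piles_deque = deque(piles)
--
--     my_total_coins = 0
--     for _ in range(len(piles)//3):
--         bob_pile = piles_deque.popleft()
--         alice_pile = piles_deque.pop()
--         my_pile = piles_deque.pop()
--
--         my_total_coins += my_pile
--     return my_total_coins
-- ===== SOURCE B (Python) =====
-- def get_max_coins(piles):
--     piles.sort()
--     n = len(piles)
--     m = n // 3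
--     return sum(piles[i] for i in range(n - 2 * m, n, 2))
-- ===== Notes on version B (the rewrite author's own statement) =====
-- stated objective: simpler
-- what changed: Replaced the deque with three pops per round by a direct index computation: after sorting, the coins taken are exactly the elements at indices n-2m, n-2m+2, ..., n-2 (m = n//3), summed in one strided range.
import Mathlib
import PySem

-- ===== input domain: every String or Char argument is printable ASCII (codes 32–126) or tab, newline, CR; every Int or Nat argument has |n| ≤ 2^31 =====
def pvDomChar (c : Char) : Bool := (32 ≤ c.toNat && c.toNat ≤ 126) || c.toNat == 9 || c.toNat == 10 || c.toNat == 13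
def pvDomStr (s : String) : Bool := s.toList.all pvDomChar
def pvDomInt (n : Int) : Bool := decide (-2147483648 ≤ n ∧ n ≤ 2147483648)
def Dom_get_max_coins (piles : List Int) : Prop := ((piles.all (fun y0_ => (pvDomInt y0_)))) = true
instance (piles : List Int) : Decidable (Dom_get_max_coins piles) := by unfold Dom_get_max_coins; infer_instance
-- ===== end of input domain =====

-- B replaces A's deque with three pops per round by summing the sorted list directly at
-- the strided indices n-2m, n-2m+2, ..., n-2 (m = n//3); simpler, same result.
-- Both Pythons sort `piles` in place; the equivalence proved here is about the return value.

-- ===== PORT A =====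
-- one round of A's loop on state (deque, my_total_coins): bob = popleft, alice = pop, me = pop
def pvStepA (st : List Int × Int) : List Int × Int :=
  let d1 := st.1.tail
  let d2 := d1.dropLast
  let my := d2.getLastD 0
  (d2.dropLast, st.2 + my)

def get_max_coins (piles : List Int) : Int :=
  let s := PySem.List.sorted piles (fun x => x)
  ((List.range (s.length / 3)).foldl (fun st _ => pvStepA st) (s, 0)).2

-- ===== PORT B =====
def get_max_coins_alt (piles : List Int) : Int :=
  let s := PySem.List.sorted piles (fun x => x)
  let n : Int := (s.length : Int)
  let m : Int := PySem.Int.floordiv n 3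
  ((PySem.List.pyRange (n - 2 * m) n 2).map (fun i => PySem.List.pyGetD s i 0)).sum

-- ===== PRECONDITION & SPEC =====
def Spec_get_max_coins (piles : List Int) (out : Int) : Prop := out = get_max_coins_alt piles
instance (piles : List Int) (out : Int) : Decidable (Spec_get_max_coins piles out) := by unfold Spec_get_max_coins; infer_instance

-- ===== CLAIM (what is proved, stated in full; the proofs are below) =====
def Claim_equal_get_max_coins : Prop := ∀ (piles : List Int), Dom_get_max_coins piles → Spec_get_max_coins piles (get_max_coins piles)

-- ===== LEMMAS AND PROOFS =====

lemma pvGetD_tdd (d : List Int) (i : Nat) (hi : i < d.length - 3) :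
    d.tail.dropLast.dropLast.getD i 0 = d.getD (i + 1) 0 := by
  simp only [List.getD_eq_getElem?_getD, List.getElem?_dropLast, List.getElem?_tail,
    List.length_dropLast, List.length_tail]
  rw [if_pos (by omega), if_pos (by omega)]

lemma pvMy_eq (d : List Int) (h : 3 ≤ d.length) :
    d.tail.dropLast.getLastD 0 = d.getD (d.length - 2) 0 := by
  simp only [List.getLastD_eq_getLast?, List.getLast?_eq_getElem?, List.getD_eq_getElem?_getD,
    List.getElem?_dropLast, List.getElem?_tail, List.length_dropLast, List.length_tail]
  rw [if_pos (by omega)]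
  have : d.length - 1 - 1 - 1 + 1 = d.length - 2 := by omega
  rw [this]

lemma pvLoopA_succ (k : Nat) (st : List Int × Int) :
    (List.range (k + 1)).foldl (fun s _ => pvStepA s) st
      = (List.range k).foldl (fun s _ => pvStepA s) (pvStepA st) := by
  simp [List.range_succ_eq_map, List.foldl_map]

-- A's loop, run k rounds on a deque d of length ≥ 3k, adds the elements at
-- indices length-2, length-4, ..., length-2k of d.
lemma pvLoopA_sum (k : Nat) (d : List Int) (t : Int) (h : 3 * k ≤ d.length) :
    ((List.range k).foldl (fun s _ => pvStepA s) (d, t)).2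
      = t + ((List.range k).map (fun j => d.getD (d.length - 2 * (j + 1)) 0)).sum := by
  induction k generalizing d t with
  | zero => simp
  | succ k ih =>
    rw [pvLoopA_succ]
    have hn : 3 ≤ d.length := by omega
    have hstep : pvStepA (d, t)
        = (d.tail.dropLast.dropLast, t + d.getD (d.length - 2) 0) := by
      simp only [pvStepA]
      rw [pvMy_eq d hn]
    rw [hstep]
    have hlen : d.tail.dropLast.dropLast.length = d.length - 3 := by simp; omega
    rw [ih _ _ (by omega)]
    have hmap : (List.range k).map
          (fun j => d.tail.dropLast.dropLast.getD (d.tail.dropLast.dropLast.length - 2 * (j + 1)) 0)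
        = (List.range k).map (fun j => d.getD (d.length - 2 * (j + 2)) 0) := by
      apply List.map_congr_left
      intro j hj
      have hj' : j < k := List.mem_range.mp hj
      rw [hlen]
      have : d.length - 3 - 2 * (j + 1) < d.length - 3 := by omega
      rw [pvGetD_tdd d _ this]
      congr 1
      omega
    rw [hmap, List.range_succ_eq_map]
    simp only [List.map_cons, List.map_map, List.sum_cons]
    have : ((List.range k).map ((fun j => d.getD (d.length - 2 * (j + 1)) 0) ∘ Nat.succ))
        = (List.range k).map (fun j => d.getD (d.length - 2 * (j + 2)) 0) := by
      apply List.map_congr_left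
      intro j _
      rfl
    rw [this]
    ring

lemma pvListSum_eq_finset (g : Nat → Int) (n : Nat) :
    ((List.range n).map g).sum = ∑ i ∈ Finset.range n, g i := rfl

-- ===== VERDICT (by name: the statement is the Claim_ definition above) =====
theorem get_max_coins_spec : Claim_equal_get_max_coins := by
  intro piles _
  unfold Spec_get_max_coins get_max_coins get_max_coins_alt
  set s := PySem.List.sorted piles (fun x => x) with hs
  simp only []
  set nN := s.length with hnN
  set mN := nN / 3 with hmN
  have hm3 : 3 * mN ≤ nN := by omega
  rw [pvLoopA_sum mN s 0 hm3, zero_add]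
  have hfd : PySem.Int.floordiv (nN : Int) 3 = ((mN : Nat) : Int) := by
    exact_mod_cast PySem.Int.floordiv_natCast nN 3
  rw [hfd]
  rcases Nat.eq_zero_or_pos mN with hm0 | hmpos
  · rw [hm0]
    rw [PySem.List.pyRange_of_pos _ _ (by norm_num : (0:Int) < 2)]
    simp
  · rw [PySem.List.pyRange_of_pos _ _ (by norm_num : (0:Int) < 2)]
    have hlt : ((nN : Int) - 2 * (mN : Int)) < (nN : Int) := by omega
    rw [if_pos hlt]
    have hcount : (((nN : Int) - ((nN : Int) - 2 * (mN : Int)) + 2 - 1) / 2).toNat = mN := by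
      have : ((nN : Int) - ((nN : Int) - 2 * (mN : Int)) + 2 - 1) = 2 * (mN : Int) + 1 := by ring
      rw [this]
      omega
    rw [hcount, List.map_map]
    have hidx : ∀ k, k < mN →
        PySem.List.pyGetD s ((nN : Int) - 2 * (mN : Int) + 2 * (k : Int)) 0
          = s.getD (nN - 2 * mN + 2 * k) 0 := by
      intro k hk
      have hcast : ((nN : Int) - 2 * (mN : Int) + 2 * (k : Int)) = ((nN - 2 * mN + 2 * k : Nat) : Int) := by
        push_cast; omega
      rw [hcast, PySem.List.pyGetD_natCast]
    have hmapB : (List.range mN).map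
          ((fun i => PySem.List.pyGetD s i 0) ∘ fun k => (nN : Int) - 2 * (mN : Int) + 2 * (k : Nat))
        = (List.range mN).map (fun k => s.getD (nN - 2 * mN + 2 * k) 0) := by
      apply List.map_congr_left
      intro k hk
      simp only [Function.comp]
      exact hidx k (List.mem_range.mp hk)
    rw [hmapB, pvListSum_eq_finset, pvListSum_eq_finset]
    rw [← Finset.sum_range_reflect (fun k => s.getD (nN - 2 * mN + 2 * k) 0) mN]
    apply Finset.sum_congr rfl
    intro j hj
    have hj' : j < mN := Finset.mem_range.mp hj
    congr 1
    omega
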